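-- pv_equiv track=rewrite | github.com/aoimaru/binnacle-icse2022_edit_v0.0.1 | __Perhaps__/__factor__/__jaroWinkler__.py | getRangeMatchChar
-- ===== SOURCE A (Python) =====
-- def getRangeMatchChar(S1, S2, distance=-1):
--     L1 = len(S1); L2 = len(S2)
--     ignored_distance = False
--
--     if distance < 0 : ignored_distance = True
--
--     ret = ""
--     for i in range(L1):
--         From = i
--         Under = L2
--         if not ignored_distance:
--             From = 0 if i<distance else i-distance
--             Under = L2 if i+distance>=L2 else i+distance
--
--         for j in range(From, Under):
--             if S1[i]==S2[j]: ret+=S1[i]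
--
--     return ret
-- ===== SOURCE B (Python) =====
-- def getRangeMatchChar(S1, S2, distance=-1):
--     L2 = len(S2)
--     occ = {}
--     for j, ch in enumerate(S2):
--         occ.setdefault(ch, []).append(j)
--     parts = []
--     for i, c in enumerate(S1):
--         if distance < 0:
--             lo, hi = i, L2
--         else:
--             lo = i - distance if i >= distance else 0
--             hi = i + distance if i + distance < L2 else L2
--         n = 0
--         for p in occ.get(c, []):
--             if lo <= p < hi:
--                 n += 1
--         parts.append(c * n)
--     return "".join(parts)
-- ===== Notes on version B (the rewrite author's own statement) =====
-- stated objective: alternative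
-- what changed: B builds a per-character inverted index of S2's positions once and, for each character of S1, counts only that character's occurrence list inside the window and joins repeated chunks, instead of A's inner scan over the whole window for every i with char-by-char string concatenation.
import Mathlib
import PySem

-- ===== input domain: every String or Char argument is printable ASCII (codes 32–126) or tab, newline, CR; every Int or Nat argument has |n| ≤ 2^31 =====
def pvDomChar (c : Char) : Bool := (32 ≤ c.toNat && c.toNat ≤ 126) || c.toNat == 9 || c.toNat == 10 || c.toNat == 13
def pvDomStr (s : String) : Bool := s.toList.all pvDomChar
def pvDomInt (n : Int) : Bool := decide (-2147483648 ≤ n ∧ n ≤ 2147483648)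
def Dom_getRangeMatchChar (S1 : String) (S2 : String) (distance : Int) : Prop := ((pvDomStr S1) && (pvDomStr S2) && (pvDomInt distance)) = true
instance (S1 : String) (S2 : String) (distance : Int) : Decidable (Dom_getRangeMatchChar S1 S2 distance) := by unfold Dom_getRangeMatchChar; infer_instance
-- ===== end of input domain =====

-- B replaces A's per-i scan of the whole window by a per-character inverted index of S2 built once, counting only that character's positions inside the window (objective: alternative algorithm).

-- ===== PORT A =====
def getRangeMatchChar (S1 : String) (S2 : String) (distance : Int) : String :=
  let s1 := S1.toList
  let s2 := S2.toList
  let L1 : Int := s1.length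
  let L2 : Int := s2.length
  let ignored : Bool := decide (distance < 0)
  let ret : List Char := (PySem.List.pyRange 0 L1 1).foldl (fun ret i =>
    let From : Int := i
    let Under : Int := L2
    let FU : Int × Int :=
      if !ignored then
        ((if i < distance then 0 else i - distance),
         (if i + distance ≥ L2 then L2 else i + distance))
      else (From, Under)
    (PySem.List.pyRange FU.1 FU.2 1).foldl (fun ret j =>
      -- S1[i], S2[j]: indices are always in range here, so the none branches are unreachable
      match PySem.List.pyGet? s1 i, PySem.List.pyGet? s2 j with
      | some a, some b => if a = b then ret ++ [a] else ret
      | _, _ => ret) ret) []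
  String.mk ret

-- ===== PORT B =====
def getRangeMatchChar_alt (S1 : String) (S2 : String) (distance : Int) : String :=
  let s2 := S2.toList
  let L2 : Int := s2.length
  -- occ: for j, ch in enumerate(S2): occ.setdefault(ch, []).append(j)
  let occ : PySem.Dict Char (List Int) :=
    ((PySem.List.enumerate s2 0).map (fun p => (p.2, p.1))).foldl
      (fun d p => d.modify p.1 [] (· ++ [p.2])) PySem.Dict.empty
  let parts : List (List Char) := (PySem.List.enumerate S1.toList 0).map (fun ic =>
    let i := ic.1
    let c := ic.2
    let lh : Int × Int :=
      if distance < 0 then (i, L2)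
      else ((if i ≥ distance then i - distance else 0),
            (if i + distance < L2 then i + distance else L2))
    let n : Int := (occ.getD c []).foldl
      (fun n p => if lh.1 ≤ p ∧ p < lh.2 then n + 1 else n) 0
    List.replicate n.toNat c)
  String.mk parts.flatten

-- ===== PRECONDITION & SPEC =====
def Spec_getRangeMatchChar (S1 : String) (S2 : String) (distance : Int) (out : String) : Prop := out = getRangeMatchChar_alt S1 S2 distance
instance (S1 : String) (S2 : String) (distance : Int) (out : String) : Decidable (Spec_getRangeMatchChar S1 S2 distance out) := by unfold Spec_getRangeMatchChar; infer_instance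

-- ===== CLAIM (what is proved, stated in full; the proofs are below) =====
def Claim_equal_getRangeMatchChar : Prop := ∀ (S1 : String) (S2 : String) (distance : Int), Dom_getRangeMatchChar S1 S2 distance → Spec_getRangeMatchChar S1 S2 distance (getRangeMatchChar S1 S2 distance)

-- ===== LEMMAS AND PROOFS =====

theorem pyGet?_eq_some_pyGetD (xs : List Char) (i : Int) (d0 : Char) (h1 : 0 ≤ i) (h2 : i < (xs.length : Int)) :
    PySem.List.pyGet? xs i = some (PySem.List.pyGetD xs i d0) := by
  simp [PySem.List.pyGet?, PySem.List.pyIdx?, PySem.List.pyGetD, h1, h2]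

theorem map_const_filter (l : List Int) (p : Int → Bool) (c : Char) :
    (l.filter p).map (fun _ => c) = List.replicate (l.countP p) c := by
  induction l with
  | nil => simp
  | cons x xs ih =>
    by_cases h : p x <;> simp [h, ih, List.replicate_succ]

theorem count_window (s2 : List Char) (c : Char) (lo hi : Int) (d0 : Char)
    (hlo : 0 ≤ lo) (hhi : hi ≤ (s2.length : Int)) :
    ((PySem.List.pyRange 0 (s2.length : Int) 1).countP
        (fun j => decide (lo ≤ j ∧ j < hi) && (PySem.List.pyGetD s2 j d0 == c)))
      = (PySem.List.pyRange lo hi 1).countP (fun j => decide (c = PySem.List.pyGetD s2 j d0)) := by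
  rcases (by omega : hi ≤ lo ∨ lo < hi) with h | h
  · rw [PySem.List.pyRange_one_eq_nil h]
    simp only [List.countP_nil]
    apply List.countP_eq_zero.2
    intro j hj
    have : ¬ (lo ≤ j ∧ j < hi) := by omega
    simp [this]
  · have h2 : lo ≤ (s2.length : Int) := by omega
    rw [PySem.List.pyRange_one_append 0 lo (s2.length : Int) hlo h2,
        PySem.List.pyRange_one_append lo hi (s2.length : Int) (by omega) hhi]
    simp only [List.countP_append]
    have z1 : (PySem.List.pyRange 0 lo 1).countP
        (fun j => decide (lo ≤ j ∧ j < hi) && (PySem.List.pyGetD s2 j d0 == c)) = 0 := by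
      apply List.countP_eq_zero.2
      intro j hj
      rw [PySem.List.mem_pyRange_one] at hj
      have : ¬ (lo ≤ j ∧ j < hi) := by omega
      simp [this]
    have z2 : (PySem.List.pyRange hi (s2.length : Int) 1).countP
        (fun j => decide (lo ≤ j ∧ j < hi) && (PySem.List.pyGetD s2 j d0 == c)) = 0 := by
      apply List.countP_eq_zero.2
      intro j hj
      rw [PySem.List.mem_pyRange_one] at hj
      have : ¬ (lo ≤ j ∧ j < hi) := by omega
      simp [this]
    rw [z1, z2]
    have : (PySem.List.pyRange lo hi 1).countP
        (fun j => decide (lo ≤ j ∧ j < hi) && (PySem.List.pyGetD s2 j d0 == c))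
        = (PySem.List.pyRange lo hi 1).countP (fun j => decide (c = PySem.List.pyGetD s2 j d0)) := by
      apply List.countP_congr
      intro j hj
      rw [PySem.List.mem_pyRange_one] at hj
      by_cases hcc : PySem.List.pyGetD s2 j d0 = c
      · simp [hj.1, hj.2, hcc]
      · simp [hj.1, hj.2, hcc, Ne.symm hcc]
    omega


theorem window_eq (distance L2 : Int) (i : Int) :
    (if (!decide (distance < 0)) = true then
        (if i < distance then 0 else i - distance,
          if i + distance ≥ L2 then L2 else i + distance)
      else (i, L2))
    = (if distance < 0 then (i, L2)
       else (if i ≥ distance then i - distance else 0,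
             if i + distance < L2 then i + distance else L2)) := by
  by_cases hd : distance < 0
  · have hb : (!decide (distance < 0)) = false := by simp [hd]
    rw [hb, if_pos hd]
    simp only [Bool.false_eq_true, if_false]
  · have hb : (!decide (distance < 0)) = true := by simp [hd]
    rw [hb, if_neg hd]
    simp only [if_true, Prod.mk.injEq]
    refine ⟨?_, ?_⟩
    · by_cases h : i < distance
      · simp [h, show ¬ i ≥ distance by omega]
      · simp [h, show i ≥ distance by omega]
    · by_cases h : i + distance ≥ L2
      · simp [h, show ¬ i + distance < L2 by omega]
      · simp [h, show i + distance < L2 by omega]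


theorem alt_count (s2 : List Char) (c : Char) (lo hi : Int)
    (hlo : 0 ≤ lo) (hhi : hi ≤ (s2.length : Int)) :
    ((((PySem.List.enumerate s2 0).map (fun p => (p.2, p.1))).foldl
        (fun d p => d.modify p.1 [] (· ++ [p.2])) PySem.Dict.empty).getD c []).foldl
        (fun n p => if lo ≤ p ∧ p < hi then n + 1 else n) (0 : Int)
      = (((PySem.List.pyRange lo hi 1).countP
            (fun j => decide (c = PySem.List.pyGetD s2 j 'A'))) : Int) := by
  rw [PySem.Dict.getD_foldl_modify_append, PySem.Dict.getD_empty, List.nil_append]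
  rw [PySem.List.foldl_ite_add_one]
  rw [List.filter_map, List.map_map]
  rw [List.countP_map]
  rw [List.countP_filter]
  rw [PySem.List.enumerate_eq_map_pyRange s2 'A']
  rw [List.countP_map]
  rw [zero_add]
  congr 1
  have hlen : PySem.List.len s2 = (s2.length : Int) := by
    simp [PySem.List.len]
  rw [hlen]
  rw [← count_window s2 c lo hi 'A' hlo hhi]
  apply List.countP_congr
  intro q hq
  rfl

theorem window_bounds (distance L2 i : Int) (hi0 : 0 ≤ i) :
    0 ≤ (if distance < 0 then (i, L2)
         else (if i ≥ distance then i - distance else 0,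
               if i + distance < L2 then i + distance else L2)).1 ∧
    (if distance < 0 then (i, L2)
         else (if i ≥ distance then i - distance else 0,
               if i + distance < L2 then i + distance else L2)).2 ≤ L2 := by
  by_cases hd : distance < 0
  · simp [hd]
    omega
  · simp [hd]
    split_ifs <;> omega

theorem a_inner (s1 s2 : List Char) (i : Int) (hi0 : 0 ≤ i) (hi1 : i < (s1.length : Int))
    (lo hi : Int) (hlo : 0 ≤ lo) (hhi : hi ≤ (s2.length : Int)) (ret : List Char) :
    (PySem.List.pyRange lo hi 1).foldl (fun ret j =>
        match PySem.List.pyGet? s1 i, PySem.List.pyGet? s2 j with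
        | some a, some b => if a = b then ret ++ [a] else ret
        | _, _ => ret) ret
      = ret ++ List.replicate ((PySem.List.pyRange lo hi 1).countP
            (fun j => decide (PySem.List.pyGetD s1 i 'A' = PySem.List.pyGetD s2 j 'A')))
          (PySem.List.pyGetD s1 i 'A') := by
  rw [PySem.List.foldl_congr_mem _ _
      (fun acc j => if PySem.List.pyGetD s1 i 'A' = PySem.List.pyGetD s2 j 'A' then
          acc ++ [PySem.List.pyGetD s1 i 'A'] else acc) _ ?h]
  · rw [PySem.List.foldl_append_ite (fun j => PySem.List.pyGetD s1 i 'A' = PySem.List.pyGetD s2 j 'A')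
        (fun _ => PySem.List.pyGetD s1 i 'A')]
    rw [map_const_filter]
  case h =>
    intro acc j hj
    rw [PySem.List.mem_pyRange_one] at hj
    rw [pyGet?_eq_some_pyGetD s1 i 'A' hi0 hi1,
        pyGet?_eq_some_pyGetD s2 j 'A' (by omega) (by omega)]

theorem pv_main (S1 S2 : String) (distance : Int) :
    getRangeMatchChar S1 S2 distance = getRangeMatchChar_alt S1 S2 distance := by
  simp only [getRangeMatchChar, getRangeMatchChar_alt]
  congr 1
  have hlen1 : PySem.List.len S1.toList = (S1.toList.length : Int) := by simp [PySem.List.len]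
  -- rewrite A's outer loop into a flatMap of per-i replicated blocks
  rw [PySem.List.foldl_congr_mem _ _
      (fun ret i => ret ++ List.replicate
          ((PySem.List.pyRange
              (if distance < 0 then (i, (S2.toList.length : Int))
               else (if i ≥ distance then i - distance else 0,
                     if i + distance < (S2.toList.length : Int) then i + distance
                     else (S2.toList.length : Int))).1
              (if distance < 0 then (i, (S2.toList.length : Int))
               else (if i ≥ distance then i - distance else 0,
                     if i + distance < (S2.toList.length : Int) then i + distance
                     else (S2.toList.length : Int))).2 1).countP
            (fun j => decide (PySem.List.pyGetD S1.toList i 'A' = PySem.List.pyGetD S2.toList j 'A')))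
          (PySem.List.pyGetD S1.toList i 'A')) _ ?hbody]
  · rw [PySem.List.foldl_append_eq_flatMap, List.nil_append]
    -- rewrite B's enumerate into a map over the same range
    rw [PySem.List.enumerate_eq_map_pyRange S1.toList 'A', hlen1, List.map_map, ← List.flatMap_def]
    rw [List.flatMap_def, List.flatMap_def]
    congr 1
    apply List.map_congr_left
    intro i hi
    rw [PySem.List.mem_pyRange_one] at hi
    simp only [Function.comp_apply]
    have hw := window_bounds distance (S2.toList.length : Int) i hi.1
    rw [alt_count S2.toList (PySem.List.pyGetD S1.toList i 'A') _ _ hw.1 hw.2]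
    simp
  case hbody =>
    intro ret i hi
    rw [PySem.List.mem_pyRange_one] at hi
    rw [window_eq distance (S2.toList.length : Int) i]
    have hw := window_bounds distance (S2.toList.length : Int) i hi.1
    exact a_inner S1.toList S2.toList i hi.1 hi.2 _ _ hw.1 hw.2 ret

-- ===== VERDICT (by name: the statement is the Claim_ definition above) =====
theorem getRangeMatchChar_spec : Claim_equal_getRangeMatchChar := by
  intro S1 S2 distance _
  exact pv_main S1 S2 distance
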